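-- pv_equiv track=rewrite | github.com/docktermj/senzing-bootcamp-kiro-powers | senzing-bootcamp/scripts/lint_steering.py | _is_in_non_workflow_section
-- ===== SOURCE A (Python) =====
-- def _is_in_non_workflow_section(lines: list, line_idx: int) -> bool:
--     """Check if a line falls inside a non-workflow section.
--
--     Non-workflow sections are headed by ## headings like "Error Handling",
--     "Troubleshooting", "Success Criteria", or "Agent Rules" that contain
--     numbered lists which are NOT workflow steps.
--
--     Args:
--         lines: List of file lines.
--         line_idx: 0-based index of the line to check.
--
--     Returns:
--         True if the line is inside a non-workflow section.
--     """
--     non_workflow_headings = {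
--         "error handling", "troubleshooting", "success criteria",
--         "agent rules", "references", "appendix", "agent behavior",
--         "transition", "query completeness gate", "completeness gate",
--     }
--     # Walk backwards to find the nearest ## heading
--     for i in range(line_idx, -1, -1):
--         stripped = lines[i].strip()
--         if stripped.startswith("## "):
--             heading_text = stripped[3:].strip().lower()
--             return heading_text in non_workflow_headings
--         # If we hit an H1 heading before any H2, the line is in the
--         # intro section — but only if the file also has ## Step headings
--         # elsewhere (indicating the numbered items are intro, not workflow)
--         if stripped.startswith("# ") and not stripped.startswith("## "):
--             # Check if there are any ## Step headings in the file
--             has_step_headings = any(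
--                 l.strip().startswith("## Step ")
--                 or l.strip().startswith("## Phase ")
--                 for l in lines
--             )
--             return has_step_headings
--     return False
-- ===== SOURCE B (Python) =====
-- NON_WORKFLOW_HEADINGS = frozenset({
--     "error handling", "troubleshooting", "success criteria",
--     "agent rules", "references", "appendix", "agent behavior",
--     "transition", "query completeness gate", "completeness gate",
-- })
--
--
-- def _is_in_non_workflow_section(lines: list, line_idx: int) -> bool:
--     """Single forward pass: remember the last governing heading at or before
--     line_idx, then classify it once at the end."""
--     last = None  # None | ("h2", lowered text) | ("h1", None)
--     for line in lines[:max(line_idx + 1, 0)]: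
--         s = line.strip()
--         if s.startswith("## "):
--             last = ("h2", s[3:].strip().lower())
--         elif s.startswith("# "):
--             last = ("h1", None)
--     if last is None:
--         return False
--     if last[0] == "h2":
--         return last[1] in NON_WORKFLOW_HEADINGS
--     return any(
--         l.strip().startswith("## Step ") or l.strip().startswith("## Phase ")
--         for l in lines
--     )
-- ===== Notes on version B (the rewrite author's own statement) =====
-- stated objective: simpler
-- what changed: A walks backwards from line_idx with early returns at the first heading found; B makes one forward pass over the prefix keeping only the last governing heading, then classifies it once at the end.
import Mathlib
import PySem

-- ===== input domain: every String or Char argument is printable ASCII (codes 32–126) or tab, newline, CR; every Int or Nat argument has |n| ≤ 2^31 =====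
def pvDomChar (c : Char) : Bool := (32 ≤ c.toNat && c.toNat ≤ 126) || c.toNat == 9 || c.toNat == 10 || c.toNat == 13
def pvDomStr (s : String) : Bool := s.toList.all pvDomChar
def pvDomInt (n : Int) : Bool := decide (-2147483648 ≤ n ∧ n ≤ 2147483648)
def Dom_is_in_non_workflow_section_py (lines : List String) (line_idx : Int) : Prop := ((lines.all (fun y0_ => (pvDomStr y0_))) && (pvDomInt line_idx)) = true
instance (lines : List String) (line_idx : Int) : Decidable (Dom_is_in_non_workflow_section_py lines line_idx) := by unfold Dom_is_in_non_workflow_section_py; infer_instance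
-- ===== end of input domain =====

-- B replaces A's backward scan (with an early return at the first heading) by one forward
-- pass that keeps only the LAST governing heading and classifies it once at the end
-- (objective: simpler decomposition; same cost).

-- ===== PORT A =====
-- the set literal non_workflow_headings (distinct string literals, kept as PySem.Set)
def nonWorkflowHeadings : PySem.Set String := PySem.Set.ofList
  ["error handling", "troubleshooting", "success criteria",
   "agent rules", "references", "appendix", "agent behavior",
   "transition", "query completeness gate", "completeness gate"]

-- any(l.strip().startswith("## Step ") or l.strip().startswith("## Phase ") for l in lines)
def hasStepHeadings (lines : List String) : Bool :=
  lines.any (fun l =>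
    PySem.Str.startswith (PySem.Str.strip l) "## Step " ||
    PySem.Str.startswith (PySem.Str.strip l) "## Phase ")

-- the body of A's 'for i in range(line_idx, -1, -1)' loop with its early returns;
-- lines[i] is ported total as pyGetD (default ""): under Pre_ every visited i is in range.
def pyA_go (lines : List String) : List Int → Bool
  | [] => false
  | i :: rest =>
    let stripped := PySem.Str.strip (PySem.List.pyGetD lines i "")
    if PySem.Str.startswith stripped "## " then
      PySem.Set.contains nonWorkflowHeadings
        (PySem.Str.lower (PySem.Str.strip (PySem.Str.slice stripped (some 3) none)))
    else if PySem.Str.startswith stripped "# " && !PySem.Str.startswith stripped "## " then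
      hasStepHeadings lines
    else
      pyA_go lines rest

def is_in_non_workflow_section_py (lines : List String) (line_idx : Int) : Bool :=
  pyA_go lines (PySem.List.pyRange line_idx (-1) (-1))

-- ===== PORT B =====
-- B's recorded heading state: ("h2", text) | ("h1", None)
inductive HeadSt where
  | h2 (text : String)
  | h1
  deriving DecidableEq, Repr

-- the classification B's loop body performs on one line
def classifyLine (line : String) : Option HeadSt :=
  let s := PySem.Str.strip line
  if PySem.Str.startswith s "## " then
    some (HeadSt.h2 (PySem.Str.lower (PySem.Str.strip (PySem.Str.slice s (some 3) none))))
  else if PySem.Str.startswith s "# " then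
    some HeadSt.h1
  else
    none

def is_in_non_workflow_section_py_alt (lines : List String) (line_idx : Int) : Bool :=
  let pref := PySem.List.slice lines none (some (max (line_idx + 1) 0))
  let last := pref.foldl
    (fun st line => match classifyLine line with
      | some x => some x
      | none => st) (none : Option HeadSt)
  match last with
  | none => false
  | some (HeadSt.h2 t) => PySem.Set.contains nonWorkflowHeadings t
  | some HeadSt.h1 => hasStepHeadings lines

-- ===== PRECONDITION & SPEC =====
-- Pre_ excludes exactly the inputs where A raises IndexError (lines[line_idx] out of range).
def Pre_is_in_non_workflow_section_py (lines : List String) (line_idx : Int) : Prop :=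
  line_idx < (lines.length : Int)
instance (lines : List String) (line_idx : Int) : Decidable (Pre_is_in_non_workflow_section_py lines line_idx) := by unfold Pre_is_in_non_workflow_section_py; infer_instance

def pvWitness_is_in_non_workflow_section_py : List String × Int :=
  (["# Intro", "## Step 1", "do it"], 2)

def Spec_is_in_non_workflow_section_py (lines : List String) (line_idx : Int) (out : Bool) : Prop := out = is_in_non_workflow_section_py_alt lines line_idx
instance (lines : List String) (line_idx : Int) (out : Bool) : Decidable (Spec_is_in_non_workflow_section_py lines line_idx out) := by unfold Spec_is_in_non_workflow_section_py; infer_instance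

-- ===== CLAIM (what is proved, stated in full; the proofs are below) =====
def Claim_equal_is_in_non_workflow_section_py : Prop := ∀ (lines : List String) (line_idx : Int), Dom_is_in_non_workflow_section_py lines line_idx → Pre_is_in_non_workflow_section_py lines line_idx → Spec_is_in_non_workflow_section_py lines line_idx (is_in_non_workflow_section_py lines line_idx)
-- ===== LEMMAS AND PROOFS =====

-- A's result on one classified line
def decideSt (lines : List String) : Option HeadSt → Bool
  | none => false
  | some (HeadSt.h2 t) => PySem.Set.contains nonWorkflowHeadings t
  | some HeadSt.h1 => hasStepHeadings lines

-- A's early-return scan is the first classification along the visited lines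
theorem pyA_go_eq_findSome (lines : List String) (idxs : List Int) :
    pyA_go lines idxs =
      decideSt lines ((idxs.map (fun i => PySem.List.pyGetD lines i "")).findSome? classifyLine) := by
  induction idxs with
  | nil => rfl
  | cons i rest ih =>
    simp only [pyA_go, List.map_cons, List.findSome?_cons]
    by_cases h1 : PySem.Str.startswith (PySem.Str.strip (PySem.List.pyGetD lines i "")) "## " = true
    · rw [if_pos h1]
      simp only [classifyLine, h1, if_true, decideSt]
    · rw [if_neg h1]
      have h1' : PySem.Str.startswith (PySem.Str.strip (PySem.List.pyGetD lines i "")) "## " = false := by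
        revert h1; cases PySem.Str.startswith (PySem.Str.strip (PySem.List.pyGetD lines i "")) "## " <;> simp
      by_cases h2 : PySem.Str.startswith (PySem.Str.strip (PySem.List.pyGetD lines i "")) "# " = true
      · rw [if_pos (by rw [h1', h2]; rfl)]
        simp only [classifyLine, h1', h2, Bool.false_eq_true, if_false, if_true, decideSt]
      · have h2' : PySem.Str.startswith (PySem.Str.strip (PySem.List.pyGetD lines i "")) "# " = false := by
          revert h2; cases PySem.Str.startswith (PySem.Str.strip (PySem.List.pyGetD lines i "")) "# " <;> simp
        rw [if_neg (by rw [h2']; simp)]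
        simp only [classifyLine, h1', h2', Bool.false_eq_true, if_false]
        exact ih

-- B's last-heading foldl is the first classification along the REVERSED lines
theorem foldl_upd_eq_findSome_reverse {α : Type} (f : α → Option HeadSt) (l : List α)
    (init : Option HeadSt) :
    l.foldl (fun st a => match f a with | some x => some x | none => st) init =
      ((l.reverse.findSome? f).or init) := by
  induction l generalizing init with
  | nil => simp
  | cons a l ih =>
    simp only [List.foldl_cons, List.reverse_cons, List.findSome?_append, ih]
    cases hl : l.reverse.findSome? f <;> cases hf : f a <;> simp [Option.or, hf]

-- the indices A visits, mapped to lines, are the reversed prefix B folds over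
theorem map_pyGetD_countdown (lines : List String) (line_idx : Int)
    (h0 : 0 ≤ line_idx) (h1 : line_idx < (lines.length : Int)) :
    (PySem.List.pyRange line_idx (-1) (-1)).map (fun i => PySem.List.pyGetD lines i "") =
      (lines.take (line_idx + 1).toNat).reverse := by
  rw [PySem.List.pyRange_neg_one_eq_reverse, List.map_reverse]
  congr 1
  have hz : (-1 : Int) + 1 = 0 := by norm_num
  rw [hz]
  have step : (PySem.List.pyRange 0 (line_idx + 1) 1).map (fun i => PySem.List.pyGetD lines i "") =
      (PySem.List.pyRange 0 (((lines.take (line_idx + 1).toNat).length : Nat) : Int) 1).map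
        (fun i => PySem.List.pyGetD (lines.take (line_idx + 1).toNat) i "") := by
    have hlen : (lines.take (line_idx + 1).toNat).length = (line_idx + 1).toNat := by
      rw [List.length_take]; omega
    rw [hlen]
    have hcast : (((line_idx + 1).toNat : Nat) : Int) = line_idx + 1 := by omega
    rw [hcast]
    apply List.map_congr_left
    intro i hi
    rw [PySem.List.mem_pyRange_one] at hi
    have hi0 : 0 ≤ i := hi.1
    have hi1 : i < line_idx + 1 := hi.2
    rw [PySem.List.pyGetD_of_nonneg, PySem.List.pyGetD_of_nonneg]
    have hget : (lines.take (line_idx + 1).toNat)[i.toNat]? = lines[i.toNat]? := by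
      rw [List.getElem?_take_of_lt (by omega)]
    simp [List.getD_eq_getElem?_getD, hget]
    all_goals exact hi0
  rw [step, PySem.List.map_pyGetD_pyRange_zero']

theorem main_eq (lines : List String) (line_idx : Int)
    (h : line_idx < (lines.length : Int)) :
    is_in_non_workflow_section_py lines line_idx =
      is_in_non_workflow_section_py_alt lines line_idx := by
  simp only [is_in_non_workflow_section_py, is_in_non_workflow_section_py_alt]
  rw [pyA_go_eq_findSome, foldl_upd_eq_findSome_reverse]
  by_cases h0 : 0 ≤ line_idx
  · have hmax : max (line_idx + 1) 0 = line_idx + 1 := by omega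
    rw [map_pyGetD_countdown lines line_idx h0 h, hmax,
        PySem.List.slice_to]
    cases hfs : (lines.take (line_idx + 1).toNat).reverse.findSome? classifyLine with
    | none => simp only [Option.or, decideSt]
    | some st => cases st <;> simp only [Option.or, decideSt]
    omega
  · have hr : PySem.List.pyRange line_idx (-1) (-1) = [] :=
      PySem.List.pyRange_neg_one_eq_nil (by omega)
    have hmax : max (line_idx + 1) 0 = 0 := by omega
    rw [hr, hmax, PySem.List.slice_to]
    simp only [Int.toNat_zero, List.take_zero, List.map_nil, List.findSome?_nil,
      List.reverse_nil, Option.or, decideSt]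
    omega

-- ===== VERDICT (by name: the statement is the Claim_ definition above) =====
theorem is_in_non_workflow_section_py_spec : Claim_equal_is_in_non_workflow_section_py := by
  intro lines line_idx _ hpre
  unfold Spec_is_in_non_workflow_section_py
  exact main_eq lines line_idx hpre
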